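-- pv_equiv track=rewrite | github.com/IO-n-A/NG-Forecaster | tests/helpers/reference_preprocess.py | _find_missing_segments
-- ===== SOURCE A (Python) =====
-- from typing import Sequence
--
-- def _find_missing_segments(values: Sequence[float | None]) -> list[tuple[int, int, int]]:
--     segments: list[tuple[int, int, int]] = []
--     idx = 0
--     while idx < len(values):
--         if values[idx] is not None:
--             idx += 1
--             continue
--
--         start = idx
--         while idx < len(values) and values[idx] is None:
--             idx += 1
--         end = idx - 1
--         segments.append((start, end, end - start + 1))
--
--     return segments
-- ===== SOURCE B (Python) =====
-- from itertools import groupby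
--
-- def _find_missing_segments(values):
--     segments = []
--     idx = 0
--     for is_none, group in groupby(values, key=lambda x: x is None):
--         length = sum(1 for _ in group)
--         if is_none:
--             segments.append((idx, idx + length - 1, length))
--         idx += length
--     return segments
-- ===== Notes on version B (the rewrite author's own statement) =====
-- stated objective: idiomatic
-- what changed: Replaced the manual two-level while-loop index scan with itertools.groupby run-grouping: one pass over (is_none, run) groups, emitting a segment per None run from the running index and group length.
import Mathlib
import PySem

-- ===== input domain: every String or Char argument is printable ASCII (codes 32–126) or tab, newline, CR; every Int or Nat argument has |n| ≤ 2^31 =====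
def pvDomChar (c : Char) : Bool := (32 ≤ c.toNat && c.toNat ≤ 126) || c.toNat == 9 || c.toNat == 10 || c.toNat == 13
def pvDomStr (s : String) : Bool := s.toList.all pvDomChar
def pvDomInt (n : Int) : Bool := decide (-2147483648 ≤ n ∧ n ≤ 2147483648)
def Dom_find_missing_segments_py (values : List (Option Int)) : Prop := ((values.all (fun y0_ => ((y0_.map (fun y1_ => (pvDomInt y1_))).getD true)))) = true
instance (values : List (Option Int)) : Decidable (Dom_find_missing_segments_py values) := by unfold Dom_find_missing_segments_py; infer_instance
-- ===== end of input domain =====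

-- B replaces A's manual two-level while-loop index scan by itertools.groupby run-grouping (more idiomatic, same O(n) cost).

-- ===== PORT A =====
-- inner while loop of A: advance idx while the current value is None; returns (remaining suffix, final idx)
def pvAInner : List (Option Int) → Int → (List (Option Int) × Int)
  | none :: rest, idx => pvAInner rest (idx + 1)
  | xs, idx => (xs, idx)

theorem pvAInner_len : ∀ (xs : List (Option Int)) (idx : Int), (pvAInner xs idx).1.length ≤ xs.length := by
  intro xs
  induction xs with
  | nil => intro idx; simp [pvAInner]
  | cons x rest ih =>
      intro idx
      cases x with
      | none => simpa [pvAInner] using Nat.le_succ_of_le (ih (idx + 1))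
      | some v => simp [pvAInner]

-- outer while loop of A, transliterated as recursion on the suffix at position idx
def pvAOuter (xs : List (Option Int)) (idx : Int) : List (Int × Int × Int) :=
  match h : xs with
  | [] => []
  | some _ :: rest => pvAOuter rest (idx + 1)
  | none :: rest =>
      let p := pvAInner rest (idx + 1)
      let start := idx
      let e := p.2 - 1
      (start, e, e - start + 1) :: pvAOuter p.1 p.2
  termination_by xs.length
  decreasing_by
    · simp
    · have := pvAInner_len rest (idx + 1); simp; omega

def find_missing_segments_py (values : List (Option Int)) : List (Int × Int × Int) :=
  pvAOuter values 0

-- ===== PORT B =====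
-- number of leading elements whose `is None` key equals b (groupby consuming one group's tail)
def pvLead (b : Bool) : List (Option Int) → Nat
  | x :: rest => if x.isNone == b then pvLead b rest + 1 else 0
  | [] => 0

theorem pvLead_le : ∀ (b : Bool) (xs : List (Option Int)), pvLead b xs ≤ xs.length := by
  intro b xs
  induction xs with
  | nil => simp [pvLead]
  | cons x rest ih =>
      simp only [pvLead, List.length_cons]
      split
      · omega
      · omega

-- groupby(values, key=lambda x: x is None), each group paired with its length
def pvRuns : List (Option Int) → List (Bool × Nat)
  | [] => []
  | x :: rest =>
      let k := pvLead x.isNone rest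
      (x.isNone, k + 1) :: pvRuns (rest.drop k)
  termination_by xs => xs.length
  decreasing_by
    have := pvLead_le x.isNone rest
    simp only [List.length_cons, List.length_drop]
    omega

-- the for loop over the groups, carrying the running index
def pvBFold : List (Bool × Nat) → Int → List (Int × Int × Int)
  | [], _ => []
  | (isNone, len) :: rest, idx =>
      if isNone then (idx, idx + (len : Int) - 1, (len : Int)) :: pvBFold rest (idx + (len : Int))
      else pvBFold rest (idx + (len : Int))

def find_missing_segments_py_alt (values : List (Option Int)) : List (Int × Int × Int) :=
  pvBFold (pvRuns values) 0

-- ===== PRECONDITION & SPEC =====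
def Spec_find_missing_segments_py (values : List (Option Int)) (out : List (Int × Int × Int)) : Prop := out = find_missing_segments_py_alt values
instance (values : List (Option Int)) (out : List (Int × Int × Int)) : Decidable (Spec_find_missing_segments_py values out) := by unfold Spec_find_missing_segments_py; infer_instance

-- ===== CLAIM (what is proved, stated in full; the proofs are below) =====
def Claim_equal_find_missing_segments_py : Prop := ∀ (values : List (Option Int)), Dom_find_missing_segments_py values → Spec_find_missing_segments_py values (find_missing_segments_py values)

-- ===== LEMMAS AND PROOFS =====

-- A's inner while advances exactly over the leading Nones
theorem pvAInner_eq : ∀ (xs : List (Option Int)) (idx : Int),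
    pvAInner xs idx = (xs.drop (pvLead true xs), idx + (pvLead true xs : Int)) := by
  intro xs
  induction xs with
  | nil => intro idx; simp [pvAInner, pvLead]
  | cons x rest ih =>
      intro idx
      cases x with
      | none =>
          simp only [pvAInner, pvLead, Option.isNone_none, beq_self_eq_true, if_true]
          rw [ih, Prod.mk.injEq]
          exact ⟨by simp, by push_cast; ring⟩
      | some v => simp [pvAInner, pvLead]

-- A's outer loop skips all leading non-Nones one step at a time
theorem pvAOuter_skip : ∀ (xs : List (Option Int)) (idx : Int),
    pvAOuter xs idx = pvAOuter (xs.drop (pvLead false xs)) (idx + (pvLead false xs : Int)) := by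
  intro xs
  induction xs with
  | nil => intro idx; simp [pvLead]
  | cons x rest ih =>
      intro idx
      cases x with
      | none => simp [pvLead]
      | some v =>
          have h1 : pvLead false (some v :: rest) = pvLead false rest + 1 := by
            simp [pvLead]
          rw [h1]
          have h2 : pvAOuter (some v :: rest) idx = pvAOuter rest (idx + 1) := by
            rw [pvAOuter]
          rw [h2, ih]
          have h3 : idx + 1 + (pvLead false rest : Int) = idx + ((pvLead false rest + 1 : Nat) : Int) := by
            push_cast; ring
          simp [h3]

theorem pvMain : ∀ (xs : List (Option Int)) (idx : Int),
    pvBFold (pvRuns xs) idx = pvAOuter xs idx := by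
  intro xs
  induction hlen : xs.length using Nat.strong_induction_on generalizing xs with
  | _ n ih =>
    intro idx
    cases xs with
    | nil => rw [pvRuns.eq_def]; simp [pvBFold, pvAOuter]
    | cons x rest =>
      cases x with
      | some v =>
          have hk := pvLead_le false rest
          have hrec : pvBFold (pvRuns (rest.drop (pvLead false rest))) (idx + ((pvLead false rest + 1 : Nat) : Int))
              = pvAOuter (rest.drop (pvLead false rest)) (idx + ((pvLead false rest + 1 : Nat) : Int)) := by
            refine ih ((rest.drop (pvLead false rest)).length) ?_ _ rfl _
            simp at hlen ⊢; omega
          rw [pvRuns.eq_def]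
          simp only [Option.isNone_some]
          rw [pvBFold]
          simp only [if_neg (by simp : ¬(false = true))]
          rw [hrec]
          have h2 : pvAOuter (some v :: rest) idx = pvAOuter rest (idx + 1) := by rw [pvAOuter]
          rw [h2, pvAOuter_skip rest (idx + 1)]
          have h3 : idx + ((pvLead false rest + 1 : Nat) : Int) = idx + 1 + (pvLead false rest : Int) := by
            push_cast; ring
          rw [h3]
      | none =>
          have hk := pvLead_le true rest
          have hrec : pvBFold (pvRuns (rest.drop (pvLead true rest))) (idx + ((pvLead true rest + 1 : Nat) : Int))
              = pvAOuter (rest.drop (pvLead true rest)) (idx + ((pvLead true rest + 1 : Nat) : Int)) := by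
            refine ih ((rest.drop (pvLead true rest)).length) ?_ _ rfl _
            simp at hlen ⊢; omega
          rw [pvRuns.eq_def]
          simp only [Option.isNone_none]
          rw [pvBFold]
          simp only [if_true]
          rw [hrec]
          conv_rhs => rw [pvAOuter]
          simp only [pvAInner_eq]
          rw [List.cons.injEq, Prod.mk.injEq, Prod.mk.injEq]
          refine ⟨⟨rfl, (by push_cast; ring), (by push_cast; ring)⟩, ?_⟩
          have h3 : idx + ((pvLead true rest + 1 : Nat) : Int) = idx + 1 + (pvLead true rest : Int) := by
            push_cast; ring
          rw [h3]

-- ===== VERDICT (by name: the statement is the Claim_ definition above) =====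
theorem find_missing_segments_py_spec : Claim_equal_find_missing_segments_py := by
  intro values _
  unfold Spec_find_missing_segments_py find_missing_segments_py find_missing_segments_py_alt
  exact (pvMain values 0).symm
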